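-- pv_equiv track=rewrite | github.com/anupyadav27/threat-engine | pythonsdk-database/oci/tools/build_dependency_graph.py | assign_kind
-- ===== SOURCE A (Python) =====
-- from typing import Dict, List, Any, Set, Tuple, Optional
--
-- def assign_kind(operation: str, python_method: Optional[str] = None) -> str:
--     """
--     Auto-assign kind based on operation name or python_method.
--     OCI-aware: Prefer python_method if present.
--     """
--     # Use python_method if available, else operation name
--     name = (python_method or operation).lower()
--
--     # Priority order (first match wins):
--     # 1. Delete operations
--     if any(name.startswith(prefix) for prefix in ['delete', 'remove', 'terminate', 'destroy', 'purge', 'detach', 'disassociate', 'revoke', 'cancel', 'disable']):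
--         return 'write_delete'
--
--     # 2. Update operations
--     if any(name.startswith(prefix) for prefix in ['update', 'modify', 'set', 'change', 'patch', 'replace', 'add', 'attach', 'associate', 'enable', 'move']):
--         return 'write_update'
--
--     # 3. Create operations
--     if any(name.startswith(prefix) for prefix in ['create', 'launch', 'start', 'run', 'provision', 'register', 'generate', 'import', 'enable']):
--         return 'write_create'
--
--     # 4. List operations
--     if any(name.startswith(prefix) for prefix in ['list', 'search', 'query', 'enumerate']):
--         return 'read_list'
--
--     # 5. Get operations
--     if any(name.startswith(prefix) for prefix in ['get', 'describe', 'read', 'fetch']):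
--         return 'read_get'
--
--     # Default
--     return 'other'
-- ===== SOURCE B (Python) =====
-- from typing import Optional
--
-- # Exact prefix -> kind index (37 distinct prefixes; no table prefix is a prefix
-- # of another, so any name matches at most one key).  'enable' appears in both
-- # A's update and create groups; update has priority, so it maps to write_update.
-- _KIND = {
--     'delete': 'write_delete', 'remove': 'write_delete', 'terminate': 'write_delete',
--     'destroy': 'write_delete', 'purge': 'write_delete', 'detach': 'write_delete',
--     'disassociate': 'write_delete', 'revoke': 'write_delete', 'cancel': 'write_delete',
--     'disable': 'write_delete',
--     'update': 'write_update', 'modify': 'write_update', 'set': 'write_update',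
--     'change': 'write_update', 'patch': 'write_update', 'replace': 'write_update',
--     'add': 'write_update', 'attach': 'write_update', 'associate': 'write_update',
--     'enable': 'write_update', 'move': 'write_update',
--     'create': 'write_create', 'launch': 'write_create', 'start': 'write_create',
--     'run': 'write_create', 'provision': 'write_create', 'register': 'write_create',
--     'generate': 'write_create', 'import': 'write_create',
--     'list': 'read_list', 'search': 'read_list', 'query': 'read_list',
--     'enumerate': 'read_list',
--     'get': 'read_get', 'describe': 'read_get', 'read': 'read_get', 'fetch': 'read_get',
-- }
--
-- # The distinct key lengths: instead of scanning patterns, we hash-index the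
-- # name's own leading substrings of these lengths.
-- _LENGTHS = (3, 4, 5, 6, 7, 8, 9, 12)
--
-- def assign_kind(operation: str, python_method: Optional[str] = None) -> str:
--     name = (python_method or operation).lower()
--     for L in _LENGTHS:
--         kind = _KIND.get(name[:L])
--         if kind is not None:
--             return kind
--     return 'other'
-- ===== Notes on version B (the rewrite author's own statement) =====
-- stated objective: alternative
-- what changed: Instead of scanning 38 prefix patterns with startswith, B hash-indexes: a dict maps each of the 37 distinct prefixes to its kind ('enable' pinned to write_update by priority) and the name's own leading substrings of the 8 distinct prefix lengths are looked up in it; correct because no table prefix is a prefix of another, so a name matches at most one key.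
import Mathlib
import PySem

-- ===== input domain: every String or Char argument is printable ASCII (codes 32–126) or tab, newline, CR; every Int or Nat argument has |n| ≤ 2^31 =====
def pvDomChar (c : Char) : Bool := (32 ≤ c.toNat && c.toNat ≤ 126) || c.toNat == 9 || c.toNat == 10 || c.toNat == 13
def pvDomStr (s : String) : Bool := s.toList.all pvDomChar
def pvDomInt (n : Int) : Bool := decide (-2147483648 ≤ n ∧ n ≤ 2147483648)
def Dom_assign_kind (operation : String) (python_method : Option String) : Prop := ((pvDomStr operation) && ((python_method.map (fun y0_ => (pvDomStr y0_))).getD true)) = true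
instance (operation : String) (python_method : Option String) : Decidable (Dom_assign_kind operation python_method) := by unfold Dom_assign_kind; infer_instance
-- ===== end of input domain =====

-- B replaces A's scan over 38 prefix patterns by a hash index: one dict prefix->kind, looked up
-- on the name's own leading substrings of the 8 distinct prefix lengths (objective: alternative).


-- ===== PORT A =====
def assign_kind (operation : String) (python_method : Option String) : String :=
  let name := PySem.Str.lower (match python_method with
    | some s => if s = "" then operation else s
    | none => operation)
  if (["delete", "remove", "terminate", "destroy", "purge", "detach", "disassociate", "revoke", "cancel", "disable"].any
      (fun p => PySem.Str.startswith name p)) then "write_delete"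
  else if (["update", "modify", "set", "change", "patch", "replace", "add", "attach", "associate", "enable", "move"].any
      (fun p => PySem.Str.startswith name p)) then "write_update"
  else if (["create", "launch", "start", "run", "provision", "register", "generate", "import", "enable"].any
      (fun p => PySem.Str.startswith name p)) then "write_create"
  else if (["list", "search", "query", "enumerate"].any
      (fun p => PySem.Str.startswith name p)) then "read_list"
  else if (["get", "describe", "read", "fetch"].any
      (fun p => PySem.Str.startswith name p)) then "read_get"
  else "other"

-- ===== PORT B =====
-- _KIND from Source B: literal dict, prefix -> kind ('enable' maps to write_update)
def kindDict : PySem.Dict String String := PySem.Dict.mk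
  [("delete", "write_delete"), ("remove", "write_delete"), ("terminate", "write_delete"),
   ("destroy", "write_delete"), ("purge", "write_delete"), ("detach", "write_delete"),
   ("disassociate", "write_delete"), ("revoke", "write_delete"), ("cancel", "write_delete"),
   ("disable", "write_delete"),
   ("update", "write_update"), ("modify", "write_update"), ("set", "write_update"),
   ("change", "write_update"), ("patch", "write_update"), ("replace", "write_update"),
   ("add", "write_update"), ("attach", "write_update"), ("associate", "write_update"),
   ("enable", "write_update"), ("move", "write_update"),
   ("create", "write_create"), ("launch", "write_create"), ("start", "write_create"),
   ("run", "write_create"), ("provision", "write_create"), ("register", "write_create"),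
   ("generate", "write_create"), ("import", "write_create"),
   ("list", "read_list"), ("search", "read_list"), ("query", "read_list"),
   ("enumerate", "read_list"),
   ("get", "read_get"), ("describe", "read_get"), ("read", "read_get"), ("fetch", "read_get")]

-- _LENGTHS from Source B: the distinct key lengths
def kindLengths : List Int := [3, 4, 5, 6, 7, 8, 9, 12]

-- the for-loop of Source B: look the name's leading substring of each length up in the dict
def kindLookup (name : String) : List Int → String
  | [] => "other"
  | L :: Ls =>
    match kindDict.get? (PySem.Str.slice name none (some L)) with  -- _KIND.get(name[:L])
    | some kind => kind
    | none => kindLookup name Ls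

def assign_kind_alt (operation : String) (python_method : Option String) : String :=
  let name := PySem.Str.lower (match python_method with
    | some s => if s = "" then operation else s
    | none => operation)
  kindLookup name kindLengths

-- ===== PRECONDITION & SPEC =====
def Spec_assign_kind (operation : String) (python_method : Option String) (out : String) : Prop := out = assign_kind_alt operation python_method
instance (operation : String) (python_method : Option String) (out : String) : Decidable (Spec_assign_kind operation python_method out) := by unfold Spec_assign_kind; infer_instance

-- ===== CLAIM (what is proved, stated in full; the proofs are below) =====
def Claim_equal_assign_kind : Prop := ∀ (operation : String) (python_method : Option String), Dom_assign_kind operation python_method → Spec_assign_kind operation python_method (assign_kind operation python_method)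

-- ===== LEMMAS AND PROOFS =====

-- first-match scan of an ordered (prefix, kind) table: the shape A's if-chain normalizes to
def firstKind (name : String) : List (String × String) → String
  | [] => "other"
  | pk :: rest => if PySem.Str.startswith name pk.1 then pk.2 else firstKind name rest

-- A's flattened table, with 'enable' duplicated exactly as in A's groups
def flatTable : List (String × String) :=
  (["delete", "remove", "terminate", "destroy", "purge", "detach", "disassociate", "revoke", "cancel", "disable"].map (fun p => (p, "write_delete")))
  ++ ((["update", "modify", "set", "change", "patch", "replace", "add", "attach", "associate", "enable", "move"].map (fun p => (p, "write_update")))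
  ++ ((["create", "launch", "start", "run", "provision", "register", "generate", "import", "enable"].map (fun p => (p, "write_create")))
  ++ ((["list", "search", "query", "enumerate"].map (fun p => (p, "read_list")))
  ++ (["get", "describe", "read", "fetch"].map (fun p => (p, "read_get"))))))

lemma find_group (name k : String) (ps : List String) (rest : List (String × String)) :
    firstKind name (ps.map (fun p => (p, k)) ++ rest)
    = if ps.any (fun p => PySem.Str.startswith name p) then k
      else firstKind name rest := by
  induction ps with
  | nil => simp
  | cons p ps ih =>
    simp only [List.map_cons, List.cons_append, firstKind, List.any_cons]
    by_cases h : PySem.Chars.startswith name.toList p.toList = true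
    · simp [h]
    · simp [h, ih]

-- A's if-chain is the first-match scan of flatTable
lemma a_eq_firstKind (name : String) :
    (if (["delete", "remove", "terminate", "destroy", "purge", "detach", "disassociate", "revoke", "cancel", "disable"].any
        (fun p => PySem.Str.startswith name p)) then "write_delete"
    else if (["update", "modify", "set", "change", "patch", "replace", "add", "attach", "associate", "enable", "move"].any
        (fun p => PySem.Str.startswith name p)) then "write_update"
    else if (["create", "launch", "start", "run", "provision", "register", "generate", "import", "enable"].any
        (fun p => PySem.Str.startswith name p)) then "write_create"
    else if (["list", "search", "query", "enumerate"].any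
        (fun p => PySem.Str.startswith name p)) then "read_list"
    else if (["get", "describe", "read", "fetch"].any
        (fun p => PySem.Str.startswith name p)) then "read_get"
    else "other") = firstKind name flatTable := by
  simp only [flatTable]
  rw [find_group, find_group, find_group, find_group,
    ← List.append_nil (List.map (fun p => (p, "read_get")) ["get", "describe", "read", "fetch"]),
    find_group]
  rfl

-- scanning an appended table
lemma firstKind_append (name : String) (X Y : List (String × String)) :
    firstKind name (X ++ Y)
    = if X.any (fun pk => PySem.Str.startswith name pk.1) then firstKind name X
      else firstKind name Y := by
  induction X with
  | nil => simp
  | cons pk X ih =>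
    simp only [List.cons_append, firstKind, List.any_cons]
    cases hx : PySem.Str.startswith name pk.1 with
    | true => simp
    | false =>
      simp [ih]
      exact if_congr (by simp) rfl rfl

-- dropping the duplicate 'enable' entry: flatTable scans like the dict's item list
lemma firstKind_dedup (name : String) :
    firstKind name flatTable = firstKind name kindDict.items := by
  have hsplit : flatTable
      = (flatTable.take 29) ++ (("enable", "write_create") :: (flatTable.drop 30)) := by decide
  have hitems : kindDict.items = (flatTable.take 29) ++ (flatTable.drop 30) := by decide
  rw [hsplit, hitems, firstKind_append, firstKind_append]
  by_cases h : ((flatTable.take 29).any fun pk => PySem.Chars.startswith name.toList pk.1.toList) = true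
  · simp [h]
  · have h' : ((flatTable.take 29).any fun pk => PySem.Chars.startswith name.toList pk.1.toList) = false := by
      simpa using h
    have henable : PySem.Chars.startswith name.toList ['e', 'n', 'a', 'b', 'l', 'e'] = false := by
      have := (List.any_eq_false).mp h' ("enable", "write_update") (by decide)
      simpa using this
    simp [h, firstKind, henable]

-- === table facts (checked by the kernel) ===
lemma keys_nodup : kindDict.keys.Nodup := by decide

-- no table prefix is a proper prefix of another: a name matches at most one key
lemma no_prefix_pair : ∀ p ∈ kindDict.keys, ∀ q ∈ kindDict.keys,
    p.toList <+: q.toList → p = q := by decide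

lemma length_mem_lengths : ∀ pk ∈ kindDict.items, ((pk.1.toList.length : Int) ∈ kindLengths) := by decide

lemma lengths_nonneg : ∀ L ∈ kindLengths, (0:Int) ≤ L := by decide

-- at most one key is a prefix of a given name
lemma uniq_match (t : List Char) (p q : String) (hp : p ∈ kindDict.keys) (hq : q ∈ kindDict.keys)
    (hpt : p.toList <+: t) (hqt : q.toList <+: t) : p = q := by
  rcases List.prefix_or_prefix_of_prefix hpt hqt with h | h
  · exact no_prefix_pair p hp q hq h
  · exact (no_prefix_pair q hq p hp h).symm

-- === characterizations of the two scans ===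
lemma firstKind_eq_other (name : String) (Lst : List (String × String))
    (h : ∀ pk ∈ Lst, PySem.Str.startswith name pk.1 = false) :
    firstKind name Lst = "other" := by
  induction Lst with
  | nil => rfl
  | cons pk rest ih =>
    simp only [firstKind, h pk (by simp)]
    exact ih (fun x hx => h x (by simp [hx]))

lemma firstKind_eq_of (name k : String) (Lst : List (String × String))
    (h1 : ∀ pk ∈ Lst, PySem.Str.startswith name pk.1 = true → pk.2 = k)
    (h2 : ∃ pk ∈ Lst, PySem.Str.startswith name pk.1 = true) :
    firstKind name Lst = k := by
  induction Lst with
  | nil => simp at h2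
  | cons pk rest ih =>
    by_cases h : PySem.Str.startswith name pk.1 = true
    · simp only [firstKind, h, if_true]
      exact h1 pk (by simp) h
    · simp only [firstKind, h]
      refine ih (fun x hx hsw => h1 x (by simp [hx]) hsw) ?_
      rcases h2 with ⟨x, hx, hsw⟩
      rcases List.mem_cons.mp hx with rfl | hx'
      · exact absurd hsw h
      · exact ⟨x, hx', hsw⟩

-- a slice name[:L] (L ≥ 0) that equals a dict key is that key
lemma slice_key_eq (name : String) (L : Int) (hL : 0 ≤ L) (q : String)
    (_hq : q ∈ kindDict.keys) (h : q = PySem.Str.slice name none (some L)) :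
    q.toList <+: name.toList := by
  have : q.toList = name.toList.take L.toNat := by
    rw [h, PySem.Str.toList_slice]
    exact PySem.List.slice_to name.toList hL
  rw [this]
  exact List.take_prefix _ _

-- B's loop returns "other" when no key is a prefix of the name
lemma kindLookup_other (name : String)
    (h : ∀ s ∈ kindDict.keys, ¬ s.toList <+: name.toList) :
    ∀ Ls : List Int, (∀ L ∈ Ls, (0:Int) ≤ L) → kindLookup name Ls = "other" := by
  intro Ls hLs
  induction Ls with
  | nil => rfl
  | cons L Ls ih =>
    have hnone : kindDict.get? (PySem.Str.slice name none (some L)) = none := by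
      rw [PySem.Dict.get?_eq_none_iff_not_mem_keys]
      intro hmem
      exact h _ hmem (slice_key_eq name L (hLs L (by simp)) _ hmem rfl)
    simp only [kindLookup, hnone]
    exact ih (fun x hx => hLs x (by simp [hx]))

-- B's loop returns the unique matching key's kind
lemma kindLookup_val (name : String) (p k : String)
    (hpk : (p, k) ∈ kindDict.items) (hpre : p.toList <+: name.toList)
    (huniq : ∀ q ∈ kindDict.keys, q.toList <+: name.toList → q = p) :
    ∀ Ls : List Int, (∀ L ∈ Ls, (0:Int) ≤ L) → ((p.toList.length : Int) ∈ Ls) →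
    kindLookup name Ls = k := by
  intro Ls hLs hmemL
  induction Ls with
  | nil => simp at hmemL
  | cons L Ls ih =>
    rcases hg : kindDict.get? (PySem.Str.slice name none (some L)) with _ | k'
    · -- no hit at this length: p's own length must be further down the list
      simp only [kindLookup, hg]
      have hLp : (p.toList.length : Int) ≠ L := by
        intro hEq
        have htake : p.toList = name.toList.take p.toList.length :=
          List.prefix_iff_eq_take.mp hpre
        have hslice : PySem.Str.slice name none (some L) = p := by
          apply String.toList_inj.mp
          rw [PySem.Str.toList_slice, ← hEq]
          rw [show PySem.Chars.slice name.toList none (some ((p.toList.length : Nat) : Int))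
              = PySem.List.slice name.toList none (some ((p.toList.length : Nat) : Int)) from rfl]
          rw [PySem.List.slice_to name.toList (Int.natCast_nonneg _)]
          simpa using htake.symm
        rw [hslice, PySem.Dict.get?_of_mem_items _ hpk keys_nodup] at hg
        simp at hg
      have : (p.toList.length : Int) ∈ Ls := by
        rcases List.mem_cons.mp hmemL with h | h
        · exact absurd h hLp
        · exact h
      exact ih (fun x hx => hLs x (by simp [hx])) this
    · -- a hit: its key is a prefix of the name, hence p itself
      simp only [kindLookup, hg]
      set s := PySem.Str.slice name none (some L) with hs
      have hmem : s ∈ kindDict.keys := by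
        by_contra hns
        rw [(PySem.Dict.get?_eq_none_iff_not_mem_keys kindDict s).mpr hns] at hg
        simp at hg
      have hsp : s = p :=
        huniq s hmem (slice_key_eq name L (hLs L (by simp)) s hmem hs)
      rw [hsp] at hg
      rw [PySem.Dict.get?_of_mem_items _ hpk keys_nodup] at hg
      exact ((Option.some.injEq _ _).mp hg).symm

-- the core equality, for an arbitrary (already lowered) name
lemma core (name : String) :
    firstKind name kindDict.items = kindLookup name kindLengths := by
  by_cases hm : ∃ pk ∈ kindDict.items, PySem.Str.startswith name pk.1 = true
  · rcases hm with ⟨⟨p, k⟩, hmem, hsw⟩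
    have hpre : p.toList <+: name.toList := by
      rw [PySem.Str.startswith_eq] at hsw
      exact (PySem.Chars.startswith_iff _ _).mp hsw
    have hpkeys : p ∈ kindDict.keys := by simpa using PySem.Dict.mem_keys_of_mem_items kindDict hmem
    have huniq : ∀ q ∈ kindDict.keys, q.toList <+: name.toList → q = p := by
      intro q hq hqt
      exact uniq_match name.toList q p hq hpkeys hqt hpre
    rw [kindLookup_val name p k hmem hpre huniq kindLengths lengths_nonneg
      (length_mem_lengths _ hmem)]
    apply firstKind_eq_of
    · intro pk hpk hswpk
      have hpk1 : pk.1.toList <+: name.toList := by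
        rw [PySem.Str.startswith_eq] at hswpk
        exact (PySem.Chars.startswith_iff _ _).mp hswpk
      have : pk.1 = p := huniq pk.1 (PySem.Dict.mem_keys_of_mem_items kindDict hpk) hpk1
      have h1 : kindDict.get? pk.1 = some pk.2 :=
        PySem.Dict.get?_of_mem_items _ hpk keys_nodup
      have h2 : kindDict.get? p = some k := PySem.Dict.get?_of_mem_items _ hmem keys_nodup
      rw [this, h2] at h1
      exact ((Option.some.injEq _ _).mp h1).symm
    · exact ⟨(p, k), hmem, hsw⟩
  · push Not at hm
    have hall : ∀ pk ∈ kindDict.items, PySem.Str.startswith name pk.1 = false := by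
      intro pk hpk
      exact Bool.eq_false_iff.mpr (hm pk hpk)
    rw [firstKind_eq_other name _ hall]
    rw [kindLookup_other name ?_ kindLengths lengths_nonneg]
    intro s hs hpre
    simp only [PySem.Dict.keys] at hs
    rcases List.mem_map.mp hs with ⟨pk, hpk, hfst⟩
    have := hall pk hpk
    rw [hfst, PySem.Str.startswith_eq] at this
    exact absurd ((PySem.Chars.startswith_iff _ _).mpr hpre) (by simp [this])

-- ===== VERDICT (by name: the statement is the Claim_ definition above) =====
theorem assign_kind_spec : Claim_equal_assign_kind := by
  intro operation python_method _
  unfold Spec_assign_kind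
  simp only [assign_kind, assign_kind_alt]
  rw [a_eq_firstKind, firstKind_dedup, core]
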